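-- pv_equiv track=rewrite | github.com/uninghetvatly/python-group-study-project | BaoHuynh/Codeforce_ex.py | num_book_reading
-- ===== SOURCE A (Python) =====
-- def num_book_reading(n, m):
--     if m > n:
--         return 0
--     mlast = m % 10
--     if mlast == 0:
--         return 0
--     store = []
--     val = mlast
--     i = 1
--     s = 0
--     while True:
--         val = (i * mlast) % 10
--         if val in store:
--             break
--         store.append(val)
--         s += val
--         i += 1
--     rep = (n // m) // len(store)
--     left = (n // m) % len(store)
--     sumleft = sum(store[:left])
--     return s * rep + sumleft
-- ===== SOURCE B (Python) =====
-- def num_book_reading(n, m):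
--     if m > n:
--         return 0
--     if m % 10 == 0:
--         return 0
--     k = n // m
--     if k < 0:
--         return 0
--     q, r = divmod(k, 10)
--     decade = sum(i * m % 10 for i in range(1, 11))
--     return q * decade + sum(i * m % 10 for i in range(1, r + 1))
-- ===== Notes on version B (the rewrite author's own statement) =====
-- stated objective: alternative
-- what changed: Replaced A's run-time cycle detection over a growing store plus rep/left arithmetic by a fixed decade decomposition: q,r = divmod(n//m,10), answer = q * (sum of last digits over one decade of multiples) + partial sum over r multiples, using that last digits of multiples always have period dividing 10.
-- intended difference: When m < 0 < n with n > -m (so n//m <= -2) and m is not a multiple of 10, A extends its periodic closed form to a negative quotient and returns a meaningless negative 'sum of last digits' (e.g. A(5,-3) = -3), while B returns 0, the intended value since there are no positive multiples to count. — e.g. on num_book_reading(5, -3): A returns -3, B returns 0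
import Mathlib
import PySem

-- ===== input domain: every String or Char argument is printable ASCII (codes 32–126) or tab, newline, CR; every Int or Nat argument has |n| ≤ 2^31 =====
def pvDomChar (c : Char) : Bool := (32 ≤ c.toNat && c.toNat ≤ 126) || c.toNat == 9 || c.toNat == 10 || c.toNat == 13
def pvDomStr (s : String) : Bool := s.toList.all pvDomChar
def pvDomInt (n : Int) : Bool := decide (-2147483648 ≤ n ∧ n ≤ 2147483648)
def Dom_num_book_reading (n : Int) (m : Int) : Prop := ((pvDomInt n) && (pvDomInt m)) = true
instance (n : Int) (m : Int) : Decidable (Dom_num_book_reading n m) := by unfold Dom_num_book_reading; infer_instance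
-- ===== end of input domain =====

-- B replaces A's last-digit cycle detection + rep/left arithmetic by a fixed decade
-- decomposition: q,r = divmod(n//m, 10); q * (decade sum of last digits) + partial sum.


-- ===== PORT A =====
-- A's 'while True' loop: each iteration either breaks (val already in store) or appends a
-- fresh value in 0..9, so it breaks within 11 iterations; fuel 11 is a totality guard only.
-- (A's initial 'val = mlast' is dead: val is reassigned before any use.)
def pvALoop (mlast : Int) : Nat → List Int → Int → Int → (List Int × Int)
  | 0, store, _, s => (store, s)
  | fuel + 1, store, i, s =>
      let val := PySem.Int.mod (i * mlast) 10
      if val ∈ store then (store, s)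
      else pvALoop mlast fuel (store ++ [val]) (i + 1) (s + val)

def num_book_reading (n : Int) (m : Int) : Int :=
  if m > n then 0
  else
    let mlast := PySem.Int.mod m 10
    if mlast = 0 then 0
    else
      let res := pvALoop mlast 11 [] 1 0
      let store := res.1
      let s := res.2
      let rep := PySem.Int.floordiv (PySem.Int.floordiv n m) (store.length : Int)
      let left := PySem.Int.mod (PySem.Int.floordiv n m) (store.length : Int)
      let sumleft := (PySem.List.slice store none (some left)).sum
      s * rep + sumleft

-- ===== PORT B =====
def num_book_reading_alt (n : Int) (m : Int) : Int :=
  if m > n then 0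
  else if PySem.Int.mod m 10 = 0 then 0
  else
    let k := PySem.Int.floordiv n m
    if k < 0 then 0
    else
      let q := PySem.Int.floordiv k 10
      let r := PySem.Int.mod k 10
      let decade := (PySem.List.pyRange 1 11 1).foldl
        (fun s i => s + PySem.Int.mod (i * m) 10) 0
      q * decade + (PySem.List.pyRange 1 (r + 1) 1).foldl
        (fun s i => s + PySem.Int.mod (i * m) 10) 0

-- ===== PRECONDITION & SPEC =====
-- When m < 0 < n with n > -m (so n//m ≤ -2) and m is not a multiple of 10, A extends its
-- periodic closed form to a negative quotient and returns a meaningless negative "sum of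
-- last digits" (e.g. A 5 (-3) = -3); B sums over the empty range and returns 0, the
-- intended value since there are no positive multiples to count.
def D_num_book_reading (n : Int) (m : Int) : Prop :=
  m < 0 ∧ -m < n ∧ PySem.Int.mod m 10 ≠ 0
instance (n : Int) (m : Int) : Decidable (D_num_book_reading n m) := by
  unfold D_num_book_reading; infer_instance

def Spec_num_book_reading (n : Int) (m : Int) (out : Int) : Prop :=
  ¬ D_num_book_reading n m → out = num_book_reading_alt n m
instance (n : Int) (m : Int) (out : Int) : Decidable (Spec_num_book_reading n m out) := by
  unfold Spec_num_book_reading; infer_instance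

def pvDiffWitness_num_book_reading : Int × Int := (5, -3)
def pvDiffWitnessOut_num_book_reading : Int × Int := (-3, 0)

-- ===== CLAIM (what is proved, stated in full; the proofs are below) =====
def Claim_unchanged_num_book_reading : Prop := ∀ (n : Int) (m : Int), Dom_num_book_reading n m → Spec_num_book_reading n m (num_book_reading n m)
def Claim_exact_num_book_reading : Prop := ∀ (n : Int) (m : Int), Dom_num_book_reading n m → D_num_book_reading n m → num_book_reading n m ≠ num_book_reading_alt n m
def Claim_changed_num_book_reading : Prop := Dom_num_book_reading (pvDiffWitness_num_book_reading.1) (pvDiffWitness_num_book_reading.2) ∧ D_num_book_reading (pvDiffWitness_num_book_reading.1) (pvDiffWitness_num_book_reading.2) ∧ num_book_reading (pvDiffWitness_num_book_reading.1) (pvDiffWitness_num_book_reading.2) = pvDiffWitnessOut_num_book_reading.1 ∧ num_book_reading_alt (pvDiffWitness_num_book_reading.1) (pvDiffWitness_num_book_reading.2) = pvDiffWitnessOut_num_book_reading.2 ∧ pvDiffWitnessOut_num_book_reading.1 ≠ pvDiffWitnessOut_num_book_reading.2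

-- ===== LEMMAS AND PROOFS =====

-- Ssum d t = Σ_{i=1..t} (i*d) mod 10: the quantity both programs compute (for n//m = t ≥ 0).
def Ssum (d : Int) : Nat → Int
  | 0 => 0
  | t + 1 => Ssum d t + ((t : Int) + 1) * d % 10

-- A fold of s + (i*m)%10 over range(1, t+1) computes Ssum (m % 10) t.
lemma foldB (m : Int) (t : Nat) :
    (PySem.List.pyRange 1 ((t : Int) + 1) 1).foldl
      (fun s i => s + PySem.Int.mod (i * m) 10) 0 = Ssum (PySem.Int.mod m 10) t := by
  induction t with
  | zero => rw [PySem.List.pyRange_one_eq_nil (by norm_num)]; rfl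
  | succ t ih =>
    rw [show (((t + 1) : Nat) : Int) + 1 = ((t : Int) + 1) + 1 by push_cast; ring,
        PySem.List.pyRange_one_succ_right (by omega), List.foldl_append, ih]
    show Ssum _ t + PySem.Int.mod (((t : Int) + 1) * m) 10 = _
    rw [Ssum]
    congr 1
    rw [PySem.Int.mod_eq_emod_of_pos (by norm_num), PySem.Int.mod_eq_emod_of_pos (by norm_num)]
    show ((t : Int) + 1) * m % 10 = ((t : Int) + 1) * (m % 10) % 10
    conv_lhs => rw [Int.mul_emod]
    conv_rhs => rw [Int.mul_emod, Int.emod_emod_of_dvd m (dvd_refl 10)]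

-- Generic cycle lemma: if store lists the first p last-digit values of multiples of d and
-- p*d ≡ 0 (mod 10), then Ssum has the periodic closed form A computes.
lemma cyc (d : Int) (store : List Int) (p : Nat) (hp : 0 < p) (hlen : store.length = p)
    (hget : ∀ r : Nat, r < p → store.getD r 0 = ((r : Int) + 1) * d % 10)
    (hper : (p : Int) * d % 10 = 0) (t : Nat) :
    Ssum d t = store.sum * ((t / p : Nat) : Int) + (store.take (t % p)).sum := by
  induction t with
  | zero => simp [Ssum]
  | succ t ih =>
    have hr : t % p < p := Nat.mod_lt _ hp
    have hq := Nat.div_add_mod t p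
    obtain ⟨u, hu⟩ : (10 : Int) ∣ (p : Int) * d := Int.dvd_of_emod_eq_zero hper
    have ht : (t : Int) = (p : Int) * ((t / p : Nat) : Int) + ((t % p : Nat) : Int) := by
      exact_mod_cast (Nat.div_add_mod t p).symm
    have key : ((t : Int) + 1) * d % 10 = (((t % p : Nat) : Int) + 1) * d % 10 := by
      calc ((t : Int) + 1) * d % 10
          = ((((t % p : Nat) : Int) + 1) * d + 10 * (((t / p : Nat) : Int) * u)) % 10 := by
            congr 1
            rw [ht, show (10 : Int) * (((t / p : Nat) : Int) * u)
                  = ((t / p : Nat) : Int) * (10 * u) by ring, ← hu]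
            ring
        _ = (((t % p : Nat) : Int) + 1) * d % 10 := by rw [Int.add_mul_emod_self_left]
    have hg := hget (t % p) hr
    have hlt : t % p < store.length := by omega
    have h' : store[t % p]? = some (store.getD (t % p) 0) := by
      rw [List.getD_eq_getElem store 0 hlt, List.getElem?_eq_getElem hlt]
    have htake : store.take (t % p + 1) = store.take (t % p) ++ [store.getD (t % p) 0] := by
      rw [List.take_add_one, h']; rfl
    rw [Ssum, ih, key, ← hg]
    by_cases hrp : t % p + 1 = p
    · have h1 : t + 1 = p * (t / p + 1) := by rw [Nat.mul_succ]; linarith [hq]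
      have e1 : (t + 1) % p = 0 := by rw [h1]; exact Nat.mul_mod_right p _
      have e2 : (t + 1) / p = t / p + 1 := by
        rw [h1]; exact Nat.mul_div_cancel_left _ hp
      have hsum : (store.take (t % p)).sum + store.getD (t % p) 0 = store.sum := by
        have etake : store.take (t % p + 1) = store := by rw [hrp, ← hlen, List.take_length]
        have h2 := htake.symm.trans etake
        calc (store.take (t % p)).sum + store.getD (t % p) 0
            = (store.take (t % p) ++ [store.getD (t % p) 0]).sum := by simp
          _ = store.sum := by rw [h2]
      rw [e1, e2]
      push_cast
      simp only [List.take_zero, List.sum_nil]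
      linarith [hsum]
    · have h1 : t + 1 = p * (t / p) + (t % p + 1) := by omega
      have e1 : (t + 1) % p = t % p + 1 := by
        rw [h1, Nat.mul_add_mod]; exact Nat.mod_eq_of_lt (by omega)
      have e2 : (t + 1) / p = t / p := by
        rw [h1, Nat.mul_add_div hp]
        have h0 : (t % p + 1) / p = 0 := Nat.div_eq_of_lt (by omega)
        omega
      rw [e1, e2, htake]
      simp
      ring

-- Ssum is periodic with period 10 (the last digits of multiples repeat each decade).
lemma Ssum_period (d : Int) (t : Nat) :
    Ssum d t = ((t / 10 : Nat) : Int) * Ssum d 10 + Ssum d (t % 10) := by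
  induction t with
  | zero => simp
  | succ t ih =>
    have hr : t % 10 < 10 := Nat.mod_lt _ (by norm_num)
    have key : ((t : Int) + 1) * d % 10 = (((t % 10 : Nat) : Int) + 1) * d % 10 := by
      calc ((t : Int) + 1) * d % 10
          = ((((t % 10 : Nat) : Int) + 1) * d + 10 * (((t / 10 : Nat) : Int) * d)) % 10 := by
            congr 1
            have ht : (t : Int) = 10 * ((t / 10 : Nat) : Int) + ((t % 10 : Nat) : Int) := by
              exact_mod_cast (Nat.div_add_mod t 10).symm
            rw [ht]; ring
        _ = _ := by rw [Int.add_mul_emod_self_left]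
    have hstep : ∀ r : Nat, Ssum d (r + 1) = Ssum d r + ((r : Int) + 1) * d % 10 :=
      fun r => rfl
    rw [Ssum, ih, key]
    by_cases hrp : t % 10 + 1 = 10
    · have e1 : (t + 1) % 10 = 0 := by omega
      have e2 : (t + 1) / 10 = t / 10 + 1 := by omega
      rw [e1, e2]
      have h10 : Ssum d (t % 10) + (((t % 10 : Nat) : Int) + 1) * d % 10 = Ssum d 10 := by
        rw [← hstep, hrp]
      rw [Nat.cast_add, Nat.cast_one, show Ssum d 0 = 0 from rfl]
      linarith [h10]
    · have e1 : (t + 1) % 10 = t % 10 + 1 := by omega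
      have e2 : (t + 1) / 10 = t / 10 := by omega
      rw [e1, e2, hstep (t % 10)]
      ring

-- The four facts about A's computed cycle table, uniform in d = m % 10 ∈ {1,…,9}.
lemma loop_facts (d : Int) (h1 : 1 ≤ d) (h2 : d < 10) :
    0 < (pvALoop d 11 [] 1 0).1.length ∧
    (∀ r : Nat, r < (pvALoop d 11 [] 1 0).1.length →
      (pvALoop d 11 [] 1 0).1.getD r 0 = ((r : Int) + 1) * d % 10) ∧
    (((pvALoop d 11 [] 1 0).1.length : Int) * d % 10 = 0) ∧
    (pvALoop d 11 [] 1 0).2 = (pvALoop d 11 [] 1 0).1.sum := by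
  interval_cases d <;> exact ⟨by decide, by decide, by decide, by decide⟩

-- ===== VERDICT (by name: the statement is the Claim_ definition above) =====
theorem num_book_reading_spec : Claim_unchanged_num_book_reading := by
  intro n m _ hD
  by_cases hmn : m > n
  · simp [num_book_reading, num_book_reading_alt, hmn]
  · by_cases hml : PySem.Int.mod m 10 = 0
    · simp only [num_book_reading, num_book_reading_alt, if_neg hmn, hml]
      norm_num
    · -- notation: d = m % 10, k = n // m, store/s = A's cycle table and its sum
      have hme : PySem.Int.mod m 10 = m % 10 := PySem.Int.mod_eq_emod_of_pos (by norm_num)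
      have hd1 : 1 ≤ PySem.Int.mod m 10 := by
        rw [hme]; rcases (Int.emod_nonneg m (by norm_num : (10:Int) ≠ 0)).lt_or_eq with h | h
        · omega
        · exact absurd (hme.trans h.symm) hml
      have hd2 : PySem.Int.mod m 10 < 10 := by rw [hme]; exact Int.emod_lt_of_pos m (by norm_num)
      obtain ⟨F1, F2, F3, F4⟩ := loop_facts (PySem.Int.mod m 10) hd1 hd2
      have hm0 : m ≠ 0 := by rintro rfl; exact hml (by decide)
      have hk : -1 ≤ PySem.Int.floordiv n m := by
        rcases lt_or_gt_of_ne hm0 with hneg | hpos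
        · have hnm : n ≤ -m := by
            by_contra hc
            exact hD ⟨hneg, by omega, hml⟩
          rw [show PySem.Int.floordiv n m = PySem.Int.floordiv (-n) (-m) from by
                rw [← PySem.Int.floordiv_neg_neg (-n) (-m), neg_neg, neg_neg]]
          rw [PySem.Int.le_floordiv_iff_mul_le (by omega : (0:Int) < -m)]
          omega
        · rw [PySem.Int.le_floordiv_iff_mul_le hpos]; omega
      have hA : num_book_reading n m
          = (pvALoop (PySem.Int.mod m 10) 11 [] 1 0).2 *
              PySem.Int.floordiv (PySem.Int.floordiv n m)
                ((pvALoop (PySem.Int.mod m 10) 11 [] 1 0).1.length : Int) +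
            (PySem.List.slice (pvALoop (PySem.Int.mod m 10) 11 [] 1 0).1 none
              (some (PySem.Int.mod (PySem.Int.floordiv n m)
                ((pvALoop (PySem.Int.mod m 10) 11 [] 1 0).1.length : Int)))).sum := by
        simp only [num_book_reading, if_neg hmn, if_neg hml]
      have hB : num_book_reading_alt n m
          = if PySem.Int.floordiv n m < 0 then 0
            else
              PySem.Int.floordiv (PySem.Int.floordiv n m) 10 *
                ((PySem.List.pyRange 1 11 1).foldl
                  (fun s i => s + PySem.Int.mod (i * m) 10) 0) +
              (PySem.List.pyRange 1 (PySem.Int.mod (PySem.Int.floordiv n m) 10 + 1) 1).foldl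
                (fun s i => s + PySem.Int.mod (i * m) 10) 0 := by
        simp only [num_book_reading_alt, if_neg hmn, if_neg hml]
      rw [hA, hB]
      have hplen : (0 : Int) < ((pvALoop (PySem.Int.mod m 10) 11 [] 1 0).1.length : Int) := by
        exact_mod_cast F1
      rcases hk.eq_or_lt with hkeq | hklt
      · -- n // m = -1: A's closed form collapses to 0 because the last cycle entry is 0
        rw [← hkeq]
        have hfd1 : PySem.Int.floordiv (-1)
            ((pvALoop (PySem.Int.mod m 10) 11 [] 1 0).1.length : Int) = -1 :=
          (PySem.Int.floordiv_eq_iff_of_pos hplen).mpr ⟨by omega, by omega⟩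
        have hmd1 : PySem.Int.mod (-1)
            ((pvALoop (PySem.Int.mod m 10) 11 [] 1 0).1.length : Int)
            = (((pvALoop (PySem.Int.mod m 10) 11 [] 1 0).1.length - 1 : Nat) : Int) := by
          have h := PySem.Int.floordiv_mul_add_mod (-1)
            ((pvALoop (PySem.Int.mod m 10) 11 [] 1 0).1.length : Int)
          rw [hfd1] at h
          rw [Nat.cast_sub F1]
          push_cast
          omega
        rw [hfd1, hmd1, PySem.List.slice_to_natCast]
        have hlast : (pvALoop (PySem.Int.mod m 10) 11 [] 1 0).1.getD
            ((pvALoop (PySem.Int.mod m 10) 11 [] 1 0).1.length - 1) 0 = 0 := by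
          rw [F2 _ (by omega)]
          rw [show ((((pvALoop (PySem.Int.mod m 10) 11 [] 1 0).1.length - 1 : Nat) : Int) + 1)
                = ((pvALoop (PySem.Int.mod m 10) 11 [] 1 0).1.length : Int) from by
              rw [Nat.cast_sub F1]; push_cast; ring]
          exact F3
        have htake : (pvALoop (PySem.Int.mod m 10) 11 [] 1 0).1.take
              ((pvALoop (PySem.Int.mod m 10) 11 [] 1 0).1.length - 1)
              ++ [(pvALoop (PySem.Int.mod m 10) 11 [] 1 0).1.getD
                    ((pvALoop (PySem.Int.mod m 10) 11 [] 1 0).1.length - 1) 0]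
            = (pvALoop (PySem.Int.mod m 10) 11 [] 1 0).1 := by
          have hlt : (pvALoop (PySem.Int.mod m 10) 11 [] 1 0).1.length - 1
              < (pvALoop (PySem.Int.mod m 10) 11 [] 1 0).1.length := by omega
          have h' : (pvALoop (PySem.Int.mod m 10) 11 [] 1 0).1[
              (pvALoop (PySem.Int.mod m 10) 11 [] 1 0).1.length - 1]?
              = some ((pvALoop (PySem.Int.mod m 10) 11 [] 1 0).1.getD
                  ((pvALoop (PySem.Int.mod m 10) 11 [] 1 0).1.length - 1) 0) := by
            rw [List.getD_eq_getElem _ 0 hlt, List.getElem?_eq_getElem hlt]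
          have h2 := (List.take_add_one (l := (pvALoop (PySem.Int.mod m 10) 11 [] 1 0).1)
            (i := (pvALoop (PySem.Int.mod m 10) 11 [] 1 0).1.length - 1)).symm
          rw [h'] at h2
          calc _ = (pvALoop (PySem.Int.mod m 10) 11 [] 1 0).1.take
                ((pvALoop (PySem.Int.mod m 10) 11 [] 1 0).1.length - 1 + 1) := h2
            _ = _ := by rw [show (pvALoop (PySem.Int.mod m 10) 11 [] 1 0).1.length - 1 + 1
                  = (pvALoop (PySem.Int.mod m 10) 11 [] 1 0).1.length from by omega,
                List.take_length]
        have hsum : ((pvALoop (PySem.Int.mod m 10) 11 [] 1 0).1.take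
              ((pvALoop (PySem.Int.mod m 10) 11 [] 1 0).1.length - 1)).sum
            = (pvALoop (PySem.Int.mod m 10) 11 [] 1 0).1.sum := by
          conv_rhs => rw [← htake]
          rw [List.sum_append, hlast]
          simp
        rw [hsum, F4, if_pos (by omega : (-1 : Int) < 0)]
        ring
      · -- n // m = t ≥ 0: both sides equal Ssum (m % 10) t via foldB and cyc
        have hkt : PySem.Int.floordiv n m = ((PySem.Int.floordiv n m).toNat : Int) :=
          (Int.toNat_of_nonneg (by omega)).symm
        rw [hkt, if_neg (by omega : ¬ (((PySem.Int.floordiv n m).toNat : Int) < 0))]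
        have hq10 : PySem.Int.floordiv (((PySem.Int.floordiv n m).toNat : Int)) 10
            = (((PySem.Int.floordiv n m).toNat / 10 : Nat) : Int) := by
          exact_mod_cast PySem.Int.floordiv_natCast (PySem.Int.floordiv n m).toNat 10
        have hr10 : PySem.Int.mod (((PySem.Int.floordiv n m).toNat : Int)) 10
            = (((PySem.Int.floordiv n m).toNat % 10 : Nat) : Int) := by
          exact_mod_cast PySem.Int.mod_natCast (PySem.Int.floordiv n m).toNat 10
        have hdec : (PySem.List.pyRange 1 11 1).foldl
            (fun s i => s + PySem.Int.mod (i * m) 10) 0 = Ssum (PySem.Int.mod m 10) 10 := by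
          rw [show (11 : Int) = ((10 : Nat) : Int) + 1 from by norm_num]
          exact foldB m 10
        rw [hq10, hr10, hdec, foldB m ((PySem.Int.floordiv n m).toNat % 10),
            PySem.Int.floordiv_natCast, PySem.Int.mod_natCast, PySem.List.slice_to_natCast,
            F4, ← cyc (PySem.Int.mod m 10) (pvALoop (PySem.Int.mod m 10) 11 [] 1 0).1
              (pvALoop (PySem.Int.mod m 10) 11 [] 1 0).1.length F1 rfl F2 F3
              (PySem.Int.floordiv n m).toNat,
            Ssum_period (PySem.Int.mod m 10) (PySem.Int.floordiv n m).toNat]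

theorem num_book_reading_changed : Claim_changed_num_book_reading := by
  unfold Claim_changed_num_book_reading; decide

-- Extra per-digit facts used only for tightness: positive cycle sum, nonnegative entries,
-- at least two entries, and a nonzero second-to-last entry.
lemma loop_facts2 (d : Int) (h1 : 1 ≤ d) (h2 : d < 10) :
    0 < (pvALoop d 11 [] 1 0).1.sum ∧
    (∀ x ∈ (pvALoop d 11 [] 1 0).1, 0 ≤ x) ∧
    2 ≤ (pvALoop d 11 [] 1 0).1.length ∧
    (pvALoop d 11 [] 1 0).1.getD ((pvALoop d 11 [] 1 0).1.length - 2) 0 ≠ 0 := by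
  interval_cases d <;> exact ⟨by decide, by decide, by decide, by decide⟩

theorem num_book_reading_tight : Claim_exact_num_book_reading := by
  intro n m _ hd
  obtain ⟨hneg, hnm, hml⟩ := hd
  have hmn : ¬ m > n := by omega
  have hme : PySem.Int.mod m 10 = m % 10 := PySem.Int.mod_eq_emod_of_pos (by norm_num)
  have hd1 : 1 ≤ PySem.Int.mod m 10 := by
    rw [hme]; rcases (Int.emod_nonneg m (by norm_num : (10:Int) ≠ 0)).lt_or_eq with h | h
    · omega
    · exact absurd (hme.trans h.symm) hml
  have hd2 : PySem.Int.mod m 10 < 10 := by rw [hme]; exact Int.emod_lt_of_pos m (by norm_num)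
  obtain ⟨F1, F2, F3, F4⟩ := loop_facts (PySem.Int.mod m 10) hd1 hd2
  obtain ⟨G1, G2, G3, G4⟩ := loop_facts2 (PySem.Int.mod m 10) hd1 hd2
  have hk2 : PySem.Int.floordiv n m ≤ -2 := by
    rw [show PySem.Int.floordiv n m = PySem.Int.floordiv (-n) (-m) from by
          rw [← PySem.Int.floordiv_neg_neg (-n) (-m), neg_neg, neg_neg]]
    have h := (PySem.Int.floordiv_lt_iff_lt_mul (q := -1) (by omega : (0:Int) < -m)).mpr
      (by omega : -n < -1 * -m)
    omega
  have hA : num_book_reading n m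
      = (pvALoop (PySem.Int.mod m 10) 11 [] 1 0).2 *
          PySem.Int.floordiv (PySem.Int.floordiv n m)
            ((pvALoop (PySem.Int.mod m 10) 11 [] 1 0).1.length : Int) +
        (PySem.List.slice (pvALoop (PySem.Int.mod m 10) 11 [] 1 0).1 none
          (some (PySem.Int.mod (PySem.Int.floordiv n m)
            ((pvALoop (PySem.Int.mod m 10) 11 [] 1 0).1.length : Int)))).sum := by
    simp only [num_book_reading, if_neg hmn, if_neg hml]
  have hB : num_book_reading_alt n m = 0 := by
    simp only [num_book_reading_alt, if_neg hmn, if_neg hml]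
    rw [if_pos (by omega : PySem.Int.floordiv n m < 0)]
  rw [hA, hB]
  have hplen : (0 : Int) < ((pvALoop (PySem.Int.mod m 10) 11 [] 1 0).1.length : Int) := by
    exact_mod_cast F1
  have hrep : PySem.Int.floordiv (PySem.Int.floordiv n m)
      ((pvALoop (PySem.Int.mod m 10) 11 [] 1 0).1.length : Int) ≤ -1 := by
    have h := (PySem.Int.floordiv_lt_iff_lt_mul (q := 0) hplen).mpr
      (by omega : PySem.Int.floordiv n m < 0 * ((pvALoop (PySem.Int.mod m 10) 11 [] 1 0).1.length : Int))
    omega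
  have hid := PySem.Int.floordiv_mul_add_mod (PySem.Int.floordiv n m)
    ((pvALoop (PySem.Int.mod m 10) 11 [] 1 0).1.length : Int)
  have hmodeq : PySem.Int.mod (PySem.Int.floordiv n m)
      ((pvALoop (PySem.Int.mod m 10) 11 [] 1 0).1.length : Int)
      = (PySem.Int.floordiv n m) % ((pvALoop (PySem.Int.mod m 10) 11 [] 1 0).1.length : Int) :=
    PySem.Int.mod_eq_emod_of_pos hplen
  have hleft0 : 0 ≤ PySem.Int.mod (PySem.Int.floordiv n m)
      ((pvALoop (PySem.Int.mod m 10) 11 [] 1 0).1.length : Int) := by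
    rw [hmodeq]; exact Int.emod_nonneg _ (by omega)
  have hleftp : PySem.Int.mod (PySem.Int.floordiv n m)
      ((pvALoop (PySem.Int.mod m 10) 11 [] 1 0).1.length : Int)
      < ((pvALoop (PySem.Int.mod m 10) 11 [] 1 0).1.length : Int) := by
    rw [hmodeq]; exact Int.emod_lt_of_pos _ hplen
  have hltoNat : PySem.Int.mod (PySem.Int.floordiv n m)
      ((pvALoop (PySem.Int.mod m 10) 11 [] 1 0).1.length : Int)
      = (((PySem.Int.mod (PySem.Int.floordiv n m)
          ((pvALoop (PySem.Int.mod m 10) 11 [] 1 0).1.length : Int)).toNat : Nat) : Int) :=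
    (Int.toNat_of_nonneg hleft0).symm
  rw [hltoNat, PySem.List.slice_to_natCast]
  set L := (pvALoop (PySem.Int.mod m 10) 11 [] 1 0).1 with hL
  set lt' := (PySem.Int.mod (PySem.Int.floordiv n m) ((L.length : Nat) : Int)).toNat with hlt'
  have hsplit : (L.take lt').sum + (L.drop lt').sum = L.sum := by
    rw [← List.sum_append, List.take_append_drop]
  have hdropnn : 0 ≤ (L.drop lt').sum :=
    List.sum_nonneg (fun x hx => G2 x (List.mem_of_mem_drop hx))
  rw [F4]
  by_cases hrep1 : PySem.Int.floordiv (PySem.Int.floordiv n m) ((L.length : Nat) : Int) = -1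
  · have hleftle : lt' ≤ L.length - 2 := by
      rw [hrep1] at hid; omega
    have hjlt : L.length - 2 < L.length := by omega
    have hmem : L.getD (L.length - 2) 0 ∈ L.drop lt' := by
      rw [List.getD_eq_getElem _ 0 hjlt]
      have he : L[L.length - 2] = (L.drop lt')[(L.length - 2) - lt']'(by
          rw [List.length_drop]; omega) := by
        rw [List.getElem_drop]
        congr 1
        omega
      rw [he]
      exact List.getElem_mem _
    have hpos2 : 0 < L.getD (L.length - 2) 0 := by
      have hmem' : L.getD (L.length - 2) 0 ∈ L := by
        rw [List.getD_eq_getElem _ 0 hjlt]; exact List.getElem_mem _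
      exact lt_of_le_of_ne (G2 _ hmem') (Ne.symm G4)
    have hle : L.getD (L.length - 2) 0 ≤ (L.drop lt').sum :=
      List.single_le_sum (fun x hx => G2 x (List.mem_of_mem_drop hx)) _ hmem
    rw [hrep1]
    have : (L.take lt').sum < L.sum := by linarith
    intro hcontra
    linarith [hcontra]
  · have hrep2 : PySem.Int.floordiv (PySem.Int.floordiv n m) ((L.length : Nat) : Int) ≤ -2 := by
      omega
    have hmul : L.sum * PySem.Int.floordiv (PySem.Int.floordiv n m) ((L.length : Nat) : Int)
        ≤ L.sum * (-2) := by
      exact mul_le_mul_of_nonneg_left hrep2 (by omega)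
    have hts : (L.take lt').sum ≤ L.sum := by linarith
    intro hcontra
    linarith [hcontra]
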